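-- pv_equiv track=rewrite | github.com/LegendZDY/nanoMD | nanomd/utils/modifications.py | find_poslist
-- ===== SOURCE A (Python) =====
-- def find_poslist(modList):
--     counter = 0
--     posList = []
--     for mod in modList:
--         counter += int(mod)
--         posList.append(counter)
--         counter += 1
--     return posList
-- ===== SOURCE B (Python) =====
-- def find_poslist(modList):
--     # Compute the grand total once, then fill the output BACK-TO-FRONT,
--     # peeling each element off the running total as we walk left.
--     ints = [int(m) for m in modList]
--     running = sum(ints)
--     out = [0] * len(ints)
--     for i in range(len(ints) - 1, -1, -1):
--         out[i] = running + i
--         running -= ints[i]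
--     return out
-- ===== Notes on version B (the rewrite author's own statement) =====
-- stated objective: alternative
-- what changed: Instead of A's forward loop with a growing counter, B sums the whole list once and then fills a preallocated output array back-to-front, subtracting each element from the running total as it walks left.
import Mathlib
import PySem

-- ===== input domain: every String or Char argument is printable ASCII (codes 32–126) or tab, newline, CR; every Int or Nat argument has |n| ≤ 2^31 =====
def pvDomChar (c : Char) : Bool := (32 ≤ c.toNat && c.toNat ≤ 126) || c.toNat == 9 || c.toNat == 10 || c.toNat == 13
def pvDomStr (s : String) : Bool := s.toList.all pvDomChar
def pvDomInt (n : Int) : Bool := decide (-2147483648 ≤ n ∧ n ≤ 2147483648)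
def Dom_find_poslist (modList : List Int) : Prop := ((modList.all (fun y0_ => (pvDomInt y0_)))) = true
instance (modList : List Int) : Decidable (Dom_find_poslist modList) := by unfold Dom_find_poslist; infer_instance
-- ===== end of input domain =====

-- B sums the list once and fills a preallocated output back-to-front, subtracting from the
-- total, instead of A's forward accumulator loop; same cost, different algorithm shape.

-- ===== PORT A =====
-- A's loop: one accumulator 'counter', appending after each int(mod) add, then +1.
def find_poslist (modList : List Int) : List Int :=
  (modList.foldl
    (fun (st : Int × List Int) mod =>
      let counter := st.1 + mod
      (counter + 1, st.2 ++ [counter]))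
    (0, [])).2

-- ===== PORT B =====
-- B: ints = [int(m) for m in modList]; running = sum(ints); out = [0]*n;
--    for i in range(n-1, -1, -1): out[i] = running + i; running -= ints[i].
-- 'out[i] = v' is ported as List.set at i.toNat (i is a nonnegative range index), and
-- 'ints[i]' as pyGetD (in range, so exact).
def find_poslist_alt (modList : List Int) : List Int :=
  let ints := modList.map (fun m => m)          -- int(m) on an int is the identity
  let running := ints.sum
  ((PySem.List.pyRange ((ints.length : Int) - 1) (-1) (-1)).foldl
    (fun (st : List Int × Int) i =>
      (st.1.set i.toNat (st.2 + i), st.2 - PySem.List.pyGetD ints i 0))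
    (List.replicate ints.length 0, running)).1

-- ===== PRECONDITION & SPEC =====
def Spec_find_poslist (modList : List Int) (out : List Int) : Prop := out = find_poslist_alt modList
instance (modList : List Int) (out : List Int) : Decidable (Spec_find_poslist modList out) := by unfold Spec_find_poslist; infer_instance

-- ===== CLAIM =====
def Claim_equal_find_poslist : Prop := ∀ (modList : List Int), Dom_find_poslist modList → Spec_find_poslist modList (find_poslist modList)

-- ===== LEMMAS AND PROOFS =====

-- A's loop as a structural recursion
def pvALoop (c : Int) : List Int → List Int
  | [] => []
  | m :: xs => (c + m) :: pvALoop (c + m + 1) xs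

theorem pvFoldl_eq_aLoop (l : List Int) (c : Int) (out : List Int) :
    (l.foldl (fun (st : Int × List Int) mod =>
      let counter := st.1 + mod
      (counter + 1, st.2 ++ [counter])) (c, out)).2 = out ++ pvALoop c l := by
  induction l generalizing c out with
  | nil => simp [pvALoop]
  | cons m xs ih => simp [List.foldl, pvALoop, ih]

-- closed form for A: element j is prefix-sum through j, plus j
theorem pvALoop_closed (l : List Int) (c : Int) :
    pvALoop c l = (List.range l.length).map (fun j => c + (l.take (j+1)).sum + (j : Int)) := by
  induction l generalizing c with
  | nil => simp [pvALoop]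
  | cons m xs ih =>
    simp only [pvALoop, List.length_cons, List.range_succ_eq_map, List.map_cons, List.map_map]
    congr 1
    · simp
    · rw [ih (c + m + 1)]
      apply List.map_congr_left
      intro j _
      simp only [Function.comp_apply, List.take_succ_cons, List.sum_cons]
      push_cast
      ring

-- B's per-level update, unrolled: pvUpds sets positions j < k to prefix(j)+j
def pvUpds (l : List Int) : Nat → List Int → List Int
  | 0, out => out
  | k+1, out => pvUpds l k (out.set k ((l.take (k+1)).sum + (k : Int)))

theorem pvUpds_getElem? (l : List Int) (k : Nat) (out : List Int) (hk : k ≤ out.length) (j : Nat) :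
    (pvUpds l k out)[j]? =
      if j < k then some ((l.take (j+1)).sum + (j : Int)) else out[j]? := by
  induction k generalizing out with
  | zero => simp [pvUpds]
  | succ k ih =>
    simp only [pvUpds]
    rw [ih _ (by simp only [List.length_set]; omega)]
    rcases lt_trichotomy j k with h | h | h
    · rw [if_pos h, if_pos (by omega)]
    · subst h
      simp [show j < out.length from by omega]
    · rw [if_neg (by omega), if_neg (by omega), List.getElem?_set]
      rw [if_neg (by omega)]

-- B's backward fold, by downward induction on k
theorem pvBFold (l : List Int) : ∀ (k : Nat), k ≤ l.length → ∀ (out : List Int),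
    ((PySem.List.pyRange ((k : Int) - 1) (-1) (-1)).foldl
      (fun (st : List Int × Int) i =>
        (st.1.set i.toNat (st.2 + i), st.2 - PySem.List.pyGetD l i 0))
      (out, (l.take k).sum)).1 = pvUpds l k out := by
  intro k
  induction k with
  | zero =>
    intro _ out
    rw [PySem.List.pyRange_neg_one_eq_nil (by norm_num)]
    simp [pvUpds]
  | succ k ih =>
    intro hk out
    have hkl : k < l.length := by omega
    have hcons : PySem.List.pyRange (((k+1 : Nat) : Int) - 1) (-1) (-1)
        = ((k : Nat) : Int) :: PySem.List.pyRange (((k : Nat) : Int) - 1) (-1) (-1) := by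
      have h1 : ((k+1 : Nat) : Int) - 1 = ((k : Nat) : Int) := by push_cast; ring
      rw [h1]
      exact PySem.List.pyRange_neg_one_cons (by omega)
    rw [hcons]
    simp only [List.foldl_cons, Int.toNat_natCast]
    have hget : PySem.List.pyGetD l ((k : Nat) : Int) 0 = l[k] := by
      rw [PySem.List.pyGetD_eq_getElem]
      · simp
      · omega
      · exact_mod_cast hkl
    have hsum : (l.take (k+1)).sum - l[k] = (l.take k).sum := by
      rw [List.take_add_one, List.sum_append, List.getElem?_eq_getElem hkl]
      simp
    rw [hget, hsum, ih (by omega)]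
    simp [pvUpds]

-- the common closed form for B
theorem pvB_closed (l : List Int) :
    find_poslist_alt l = (List.range l.length).map (fun j => (l.take (j+1)).sum + (j : Int)) := by
  unfold find_poslist_alt
  simp only [show l.map (fun m => m) = l from by simp]
  rw [show l.sum = (l.take l.length).sum from by simp, pvBFold l l.length le_rfl]
  apply List.ext_getElem?
  intro j
  rw [pvUpds_getElem? l l.length _ (by simp)]
  by_cases hj : j < l.length
  · simp [hj]
  · rw [if_neg hj]
    rw [List.getElem?_eq_none_iff.mpr (by simpa using hj),
        List.getElem?_eq_none_iff.mpr (by simpa using hj)]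

-- ===== VERDICT =====
theorem find_poslist_spec : Claim_equal_find_poslist := by
  intro l _
  unfold Spec_find_poslist find_poslist
  rw [pvFoldl_eq_aLoop, pvALoop_closed, pvB_closed]
  simp
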